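-- pv_equiv track=rewrite | github.com/MickaelBergem/ShannonUniversalPredictor | src-py/naive_algorithm.py | find_longest_suffix
-- ===== SOURCE A (Python) =====
-- def find_longest_suffix(history):
--     """
--     Finds the longest suffix
--
--     Naive implementation.
--     """
--
--     length_history = len(history)
--
--     max_depth = 0
--     marker_index = None
--     best_suffix = None
--
--     # Enumerate possible suffixes
--     for index in range(1, length_history):
--         suffix = history[index:]
--
--         for offset in range(length_history-len(suffix)):
--             # Compare to find if the suffix matches
--             proposed_suffix = history[offset:offset+len(suffix)]
--             if suffix == proposed_suffix and len(suffix) > max_depth: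
--                 max_depth = len(suffix)
--                 best_suffix = suffix
--                 marker_index = offset + len(suffix) - 1
--
--     return (max_depth, marker_index, best_suffix)
-- ===== SOURCE B (Python) =====
-- def _match_len(history, e):
--     """Length of the longest common suffix of history[:e+1] and history,
--     found by walking backwards character by character."""
--     n = len(history)
--     t = 0
--     while t <= e and history[e - t] == history[n - 1 - t]:
--         t += 1
--     return t
--
--
-- def find_longest_suffix(history):
--     n = len(history)
--     best = 0
--     marker = None
--     for e in range(n - 1):
--         t = _match_len(history, e)
--         if t > best:
--             best = t
--             marker = e
--     if best == 0:
--         return (0, None, None)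
--     return (best, marker, history[n - best:])
-- ===== Notes on version B (the rewrite author's own statement) =====
-- stated objective: faster
-- what changed: A enumerates every suffix and, for each, re-extracts and compares a full candidate slice at every earlier offset (three nested passes); B makes one backward character walk per candidate end position, computing the longest common suffix of history[:e+1] and history incrementally, then keeps the first position attaining the maximum.
import Mathlib
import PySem

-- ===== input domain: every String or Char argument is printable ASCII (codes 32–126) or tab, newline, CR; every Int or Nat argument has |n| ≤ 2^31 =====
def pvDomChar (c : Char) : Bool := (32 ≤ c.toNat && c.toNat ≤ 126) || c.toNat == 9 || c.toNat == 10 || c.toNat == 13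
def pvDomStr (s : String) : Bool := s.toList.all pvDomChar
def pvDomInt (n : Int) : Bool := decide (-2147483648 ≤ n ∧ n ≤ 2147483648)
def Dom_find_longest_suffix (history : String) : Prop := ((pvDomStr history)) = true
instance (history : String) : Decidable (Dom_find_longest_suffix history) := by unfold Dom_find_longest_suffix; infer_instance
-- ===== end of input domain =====

-- B replaces A's cubic enumerate-every-suffix-and-every-offset slice comparison by one
-- backward character walk per candidate end position (objective: faster).

-- ===== PORT A =====
def find_longest_suffix (history : String) : Int × Option Int × Option String :=
  let length_history : Int := PySem.Str.len history
  (PySem.List.pyRange 1 length_history 1).foldl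
    (fun st index =>
      let suffix := PySem.Str.slice history (some index) none
      (PySem.List.pyRange 0 (length_history - PySem.Str.len suffix) 1).foldl
        (fun st offset =>
          let proposed_suffix :=
            PySem.Str.slice history (some offset) (some (offset + PySem.Str.len suffix))
          if suffix == proposed_suffix ∧ PySem.Str.len suffix > st.1 then
            (PySem.Str.len suffix, some (offset + PySem.Str.len suffix - 1), some suffix)
          else st)
        st)
    ((0 : Int), (none : Option Int), (none : Option String))

-- ===== PORT B =====
-- while-loop of Source B's `_match_len`: walk back while `t ≤ e` (fuel `e+1-t`) and chars agree
def matchLenGo (cs : List Char) (n e : Nat) : Nat → Nat → Nat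
  | 0, t => t
  | k + 1, t =>
    if cs.getD (e - t) ' ' = cs.getD (n - 1 - t) ' ' then matchLenGo cs n e k (t + 1) else t

def matchLen (cs : List Char) (e : Nat) : Nat :=
  matchLenGo cs cs.length e (e + 1) 0

def find_longest_suffix_alt (history : String) : Int × Option Int × Option String :=
  let cs := history.toList
  let n := cs.length
  let st :=
    (List.range (n - 1)).foldl
      (fun (st : Nat × Option Nat) e =>
        let t := matchLen cs e
        if t > st.1 then (t, some e) else st)
      (0, none)
  if st.1 = 0 then (0, none, none)
  else ((st.1 : Int), st.2.map (fun e => (e : Int)), some (String.ofList (cs.drop (n - st.1))))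

-- ===== PRECONDITION & SPEC =====
def Spec_find_longest_suffix (history : String) (out : Int × Option Int × Option String) : Prop := out = find_longest_suffix_alt history
instance (history : String) (out : Int × Option Int × Option String) : Decidable (Spec_find_longest_suffix history out) := by unfold Spec_find_longest_suffix; infer_instance

-- ===== CLAIM (what is proved, stated in full; the proofs are below) =====
def Claim_equal_find_longest_suffix : Prop := ∀ (history : String), Dom_find_longest_suffix history → Spec_find_longest_suffix history (find_longest_suffix history)

-- ===== LEMMAS AND PROOFS =====

-- generic "keep the strictly better candidate" fold step
def pvStep {γ α β : Type} [LinearOrder γ] (p : α → Bool) (f : α → γ) (g : α → β)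
    (st : γ × β) (x : α) : γ × β :=
  if p x = true ∧ f x > st.1 then (f x, g x) else st

theorem pvStep_noupdate {γ α β : Type} [LinearOrder γ] (p : α → Bool) (f : α → γ) (g : α → β)
    (l : List α) (d : γ) (b : β) (h : ∀ x ∈ l, p x = true → f x ≤ d) :
    l.foldl (pvStep p f g) (d, b) = (d, b) := by
  induction l with
  | nil => rfl
  | cons x xs ih =>
    have hx : pvStep p f g (d, b) x = (d, b) := by
      unfold pvStep
      split_ifs with hc
      · exact absurd (h x (by simp) hc.1) (not_le.mpr hc.2)
      · rfl
    simpa [hx] using ih (fun y hy hp => h y (by simp [hy]) hp)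

theorem pvStep_fst_lt {γ α β : Type} [LinearOrder γ] (p : α → Bool) (f : α → γ) (g : α → β)
    (l : List α) (M : γ) :
    ∀ (d : γ) (b : β), d < M → (∀ x ∈ l, p x = true → f x < M) →
      (l.foldl (pvStep p f g) (d, b)).1 < M := by
  induction l with
  | nil => intro d b hd _; simpa using hd
  | cons x xs ih =>
    intro d b hd h
    simp only [List.foldl_cons]
    by_cases hc : p x = true ∧ f x > d
    · have : pvStep p f g (d, b) x = (f x, g x) := by unfold pvStep; simp [hc]
      rw [this]
      exact ih _ _ (h x (by simp) hc.1) (fun y hy hp => h y (by simp [hy]) hp)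
    · have : pvStep p f g (d, b) x = (d, b) := by unfold pvStep; simp [hc]
      rw [this]
      exact ih _ _ hd (fun y hy hp => h y (by simp [hy]) hp)

theorem pvStep_split {γ α β : Type} [LinearOrder γ] (p : α → Bool) (f : α → γ) (g : α → β)
    (l₁ : List α) (x₀ : α) (l₂ : List α) (d₀ : γ) (b₀ : β)
    (hp : p x₀ = true) (hd : d₀ < f x₀)
    (h1 : ∀ x ∈ l₁, p x = true → f x < f x₀)
    (h2 : ∀ x ∈ l₂, p x = true → f x ≤ f x₀) :
    (l₁ ++ x₀ :: l₂).foldl (pvStep p f g) (d₀, b₀) = (f x₀, g x₀) := by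
  rw [List.foldl_append]
  have hlt : (l₁.foldl (pvStep p f g) (d₀, b₀)).1 < f x₀ :=
    pvStep_fst_lt p f g l₁ (f x₀) d₀ b₀ hd h1
  simp only [List.foldl_cons]
  rw [show pvStep p f g (l₁.foldl (pvStep p f g) (d₀, b₀)) x₀ = (f x₀, g x₀) by
    unfold pvStep; exact if_pos ⟨hp, hlt⟩]
  exact pvStep_noupdate p f g l₂ (f x₀) (g x₀) h2

-- char-wise "suffix of length L ends at e" predicate
def GoodE (cs : List Char) (e L : Nat) : Prop :=
  ∀ j < L, cs.getD (e - j) ' ' = cs.getD (cs.length - 1 - j) ' '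

theorem matchLenGo_spec (cs : List Char) (e : Nat) :
    ∀ (k t : Nat), t + k = e + 1 →
      (∀ j < t, cs.getD (e - j) ' ' = cs.getD (cs.length - 1 - j) ' ') →
      (∀ j < matchLenGo cs cs.length e k t,
          cs.getD (e - j) ' ' = cs.getD (cs.length - 1 - j) ' ') ∧
        t ≤ matchLenGo cs cs.length e k t ∧ matchLenGo cs cs.length e k t ≤ e + 1 ∧
        (matchLenGo cs cs.length e k t < e + 1 →
          cs.getD (e - matchLenGo cs cs.length e k t) ' ' ≠
            cs.getD (cs.length - 1 - matchLenGo cs cs.length e k t) ' ') := by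
  intro k
  induction k with
  | zero =>
    intro t ht hgood
    simp only [matchLenGo]
    exact ⟨hgood, le_refl t, by omega, by omega⟩
  | succ k ih =>
    intro t ht hgood
    simp only [matchLenGo]
    by_cases hc : cs.getD (e - t) ' ' = cs.getD (cs.length - 1 - t) ' '
    · rw [if_pos hc]
      have hgood' : ∀ j < t + 1, cs.getD (e - j) ' ' = cs.getD (cs.length - 1 - j) ' ' := by
        intro j hj
        rcases Nat.lt_succ_iff_lt_or_eq.mp hj with h | h
        · exact hgood j h
        · subst h; exact hc
      obtain ⟨a, b, c, d⟩ := ih (t + 1) (by omega) hgood'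
      exact ⟨a, by omega, c, d⟩
    · rw [if_neg hc]
      exact ⟨hgood, le_refl t, by omega, fun _ => hc⟩

theorem le_matchLen_iff (cs : List Char) (e L : Nat) :
    L ≤ matchLen cs e ↔ L ≤ e + 1 ∧ GoodE cs e L := by
  obtain ⟨hg, -, hub, hneq⟩ :=
    matchLenGo_spec cs e (e + 1) 0 (by omega) (by omega)
  rw [show matchLenGo cs cs.length e (e + 1) 0 = matchLen cs e from rfl] at hg hub hneq
  constructor
  · intro hL
    exact ⟨le_trans hL hub, fun j hj => hg j (lt_of_lt_of_le hj hL)⟩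
  · rintro ⟨hLe, hgood⟩
    by_contra hcon
    have hlt : matchLen cs e < L := by omega
    exact (hneq (by omega)) (hgood _ hlt)

theorem slice_eq_iff_goodE (cs : List Char) (k o : Nat)
    (hi : 1 + k < cs.length) (ho : o < 1 + k) :
    cs.drop (1 + k) = (cs.drop o).take (cs.length - (1 + k)) ↔
      GoodE cs (o + (cs.length - (1 + k)) - 1) (cs.length - (1 + k)) := by
  have hlen1 : (cs.drop (1 + k)).length = cs.length - (1 + k) := by simp
  have hlen2 : ((cs.drop o).take (cs.length - (1 + k))).length = cs.length - (1 + k) := by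
    simp; omega
  constructor
  · intro h j hj
    have := List.getElem_of_eq h (by omega : cs.length - (1 + k) - 1 - j < (cs.drop (1 + k)).length)
    rw [List.getElem_drop, List.getElem_take, List.getElem_drop] at this
    have e1 : o + (cs.length - (1 + k)) - 1 - j = o + (cs.length - (1 + k) - 1 - j) := by omega
    have e2 : cs.length - 1 - j = 1 + k + (cs.length - (1 + k) - 1 - j) := by omega
    rw [e1, e2]
    have hr1 : o + (cs.length - (1 + k) - 1 - j) < cs.length := by omega
    have hr2 : 1 + k + (cs.length - (1 + k) - 1 - j) < cs.length := by omega
    rw [List.getD_eq_getElem cs ' ' hr1, List.getD_eq_getElem cs ' ' hr2]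
    exact this.symm
  · intro h
    apply List.ext_getElem (by omega)
    intro i h1 h2
    have hiL : i < cs.length - (1 + k) := by omega
    have hj : cs.length - (1 + k) - 1 - i < cs.length - (1 + k) := by omega
    have := h _ hj
    have e1 : o + (cs.length - (1 + k)) - 1 - (cs.length - (1 + k) - 1 - i) = o + i := by omega
    have e2 : cs.length - 1 - (cs.length - (1 + k) - 1 - i) = 1 + k + i := by omega
    rw [e1, e2] at this
    have hr1 : o + i < cs.length := by omega
    have hr2 : 1 + k + i < cs.length := by omega
    rw [List.getD_eq_getElem cs ' ' hr1, List.getD_eq_getElem cs ' ' hr2] at this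
    rw [List.getElem_drop, List.getElem_take, List.getElem_drop]
    exact this.symm

-- A's data on Nat index pairs (k = index-1, o = offset)
def pA (cs : List Char) (x : Nat × Nat) : Bool :=
  decide (cs.drop (1 + x.1) = (cs.drop x.2).take (cs.length - (1 + x.1)))
def fA (cs : List Char) (x : Nat × Nat) : Int := ((cs.length - (1 + x.1) : Nat) : Int)
def gA (cs : List Char) (x : Nat × Nat) : Option Int × Option String :=
  (some ((x.2 : Int) + fA cs x - 1), some (String.ofList (cs.drop (1 + x.1))))
def pairsA (cs : List Char) : List (Nat × Nat) :=
  (List.range (cs.length - 1)).flatMap (fun k => (List.range (1 + k)).map (fun o => (k, o)))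

theorem A_normal (history : String) :
    find_longest_suffix history =
      (pairsA history.toList).foldl
        (pvStep (pA history.toList) (fA history.toList) (gA history.toList))
        (0, none, none) := by
  unfold find_longest_suffix
  simp only [PySem.Str.len_eq]
  rw [PySem.List.pyRange_one]
  rw [show (((history.toList.length : Int)) - 1).toNat = history.toList.length - 1 from by omega]
  rw [List.foldl_map]
  rw [pairsA, List.foldl_flatMap]
  apply PySem.List.foldl_congr_mem
  intro st k hk
  rw [List.mem_range] at hk
  have hidx : (1 : Int) + (k : Int) = ((1 + k : Nat) : Int) := by push_cast; ring
  rw [hidx]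
  have hsuf : PySem.Str.slice history (some ((1 + k : Nat) : Int)) none =
      String.ofList (history.toList.drop (1 + k)) := by
    rw [← String.toList_inj, PySem.Str.toList_slice, PySem.Chars.slice_eq_listSlice,
      PySem.List.slice_from _ (by omega), String.toList_ofList]
    simp
    omega
  rw [hsuf]
  simp only [String.toList_ofList, List.length_drop]
  rw [show (history.toList.length : Int) - ((history.toList.length - (1 + k) : Nat) : Int) =
      ((1 + k : Nat) : Int) from by omega]
  rw [PySem.List.pyRange_one]
  rw [show (((1 + k : Nat) : Int) - 0).toNat = 1 + k from by omega]
  rw [List.foldl_map, List.foldl_map]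
  apply PySem.List.foldl_congr_mem
  intro st' o ho
  rw [List.mem_range] at ho
  have hoff : (0 : Int) + (o : Int) = ((o : Nat) : Int) := by ring
  rw [hoff]
  have hprop : PySem.Str.slice history (some ((o : Nat) : Int))
      (some (((o : Nat) : Int) + ((history.toList.length - (1 + k) : Nat) : Int))) =
      String.ofList ((history.toList.drop o).take (history.toList.length - (1 + k))) := by
    rw [← String.toList_inj, PySem.Str.toList_slice, PySem.Chars.slice_eq_listSlice,
      PySem.List.slice_natCast_add, String.toList_ofList]
  rw [hprop]
  unfold pvStep pA fA gA
  apply if_congr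
  · constructor
    · rintro ⟨hbeq, hgt⟩
      refine ⟨?_, hgt⟩
      have : String.ofList (history.toList.drop (1 + k)) =
          String.ofList ((history.toList.drop o).take (history.toList.length - (1 + k))) :=
        beq_iff_eq.mp hbeq
      have := congrArg String.toList this
      simp only [String.toList_ofList] at this
      simpa using this
    · rintro ⟨heq, hgt⟩
      refine ⟨?_, hgt⟩
      have heq' : history.toList.drop (1 + k) =
          (history.toList.drop o).take (history.toList.length - (1 + k)) := by simpa using heq
      exact beq_iff_eq.mpr (by rw [heq'])
  · rfl
  · rfl

def Bfold (cs : List Char) : Nat × Option Nat :=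
  (List.range (cs.length - 1)).foldl
    (pvStep (fun _ => true) (matchLen cs) (fun e => some e)) (0, none)

theorem B_normal (history : String) :
    find_longest_suffix_alt history =
      (if (Bfold history.toList).1 = 0 then ((0 : Int), none, none)
       else (((Bfold history.toList).1 : Int),
         (Bfold history.toList).2.map (fun e => (e : Int)),
         some (String.ofList
           (history.toList.drop (history.toList.length - (Bfold history.toList).1))))) := by
  have hstep : (fun (st : Nat × Option Nat) e =>
      let t := matchLen history.toList e
      if t > st.1 then (t, some e) else st) =
      pvStep (fun _ => true) (matchLen history.toList) (fun e => some e) := by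
    funext st e
    unfold pvStep
    simp
  unfold find_longest_suffix_alt Bfold
  rw [← hstep]

theorem range_split (a m : Nat) (h : a < m) :
    List.range m = List.range a ++ a :: List.range' (a + 1) (m - a - 1) := by
  have h1 : List.range' 0 a 1 ++ List.range' (0 + 1 * a) (m - a) 1 = List.range' 0 (a + (m - a)) 1 :=
    List.range'_append
  have h2 : m - a = (m - a - 1) + 1 := by omega
  rw [List.range_eq_range', show m = a + (m - a) from by omega, ← h1, h2, List.range'_succ]
  simp [List.range_eq_range']

-- if every candidate end position matches nothing, A's pair (k,o) can never match
theorem no_match_of_all_zero (cs : List Char) (k o : Nat)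
    (hk : k < cs.length - 1) (ho : o < 1 + k)
    (hall : ∀ e < cs.length - 1, matchLen cs e = 0) :
    pA cs (k, o) ≠ true := by
  intro hp
  have heq := of_decide_eq_true hp
  have hgood := (slice_eq_iff_goodE cs k o (by omega) ho).mp heq
  have hL : 1 ≤ cs.length - (1 + k) := by omega
  have he : o + (cs.length - (1 + k)) - 1 < cs.length - 1 := by omega
  have := (le_matchLen_iff cs (o + (cs.length - (1 + k)) - 1) (cs.length - (1 + k))).mpr
    ⟨by omega, hgood⟩
  rw [hall _ he] at this
  omega

-- ===== VERDICT (by name: the statement is the Claim_ definition above) =====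
theorem find_longest_suffix_spec : Claim_equal_find_longest_suffix := by
  intro history _
  unfold Spec_find_longest_suffix
  rw [A_normal, B_normal]
  by_cases hall : ∀ e < history.toList.length - 1, matchLen history.toList e = 0
  · -- no non-trivial repeated suffix: both return (0, none, none)
    have hB : Bfold history.toList = (0, none) := by
      unfold Bfold
      exact pvStep_noupdate _ _ _ _ _ _
        (fun e he _ => by rw [hall e (List.mem_range.mp he)])
    have hA : (pairsA history.toList).foldl
        (pvStep (pA history.toList) (fA history.toList) (gA history.toList))
        (0, none, none) = (0, none, none) := by
      apply pvStep_noupdate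
      intro x hx hp
      simp only [pairsA, List.mem_flatMap, List.mem_map, List.mem_range] at hx
      obtain ⟨k, hk, o, ho, rfl⟩ := hx
      exact absurd hp (no_match_of_all_zero _ _ _ hk ho hall)
    rw [hA, hB]
    simp
  · push Not at hall
    obtain ⟨e', he', hne'⟩ := hall
    set cs := history.toList with hcs
    set M := Finset.sup (Finset.range (cs.length - 1)) (matchLen cs) with hM
    have hMle : ∀ e, e < cs.length - 1 → matchLen cs e ≤ M :=
      fun e he => Finset.le_sup (Finset.mem_range.mpr he)
    have hMpos : 0 < M := lt_of_lt_of_le (by omega) (hMle e' he')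
    have hex : ∃ e, e < cs.length - 1 ∧ M ≤ matchLen cs e := by
      obtain ⟨i, hi, hieq⟩ := Finset.exists_mem_eq_sup (Finset.range (cs.length - 1))
        ⟨e', Finset.mem_range.mpr he'⟩ (matchLen cs)
      exact ⟨i, Finset.mem_range.mp hi, le_of_eq hieq⟩
    set e₀ := Nat.find hex with he₀def
    obtain ⟨he₀lt, he₀ge⟩ := Nat.find_spec hex
    have he₀eq : matchLen cs e₀ = M := le_antisymm (hMle _ (by omega)) he₀ge
    obtain ⟨hMe, hgood₀⟩ := (le_matchLen_iff cs e₀ M).mp (he₀eq ▸ le_refl M)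
    have hn2 : 2 ≤ cs.length := by omega
    have hMn : M ≤ cs.length - 1 := by omega
    -- B side: the fold keeps the first end position attaining the maximum M
    have hB : Bfold cs = (M, some e₀) := by
      unfold Bfold
      rw [range_split e₀ (cs.length - 1) (by omega)]
      have hsp := pvStep_split (γ := Nat) (fun _ => true) (matchLen cs) (fun e => some e)
        (List.range e₀) e₀ (List.range' (e₀ + 1) (cs.length - 1 - e₀ - 1)) 0 none rfl
        (by omega)
        (fun x hx _ => by
          have hxlt : x < e₀ := List.mem_range.mp hx
          have h1 : matchLen cs x ≤ M := hMle x (by omega)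
          rcases lt_or_eq_of_le h1 with h | h
          · omega
          · exact absurd ⟨by omega, le_of_eq h.symm⟩ (Nat.find_min hex (by omega)))
        (fun x hx _ => by
          obtain ⟨-, hxlt⟩ := List.mem_range'_1.mp hx
          have := hMle x (by omega)
          omega)
      rw [hsp, he₀eq]
    -- A side: the pair (k₀, o₀) encodes the same suffix occurrence
    set k₀ := cs.length - 1 - M with hk₀def
    set o₀ := e₀ + 1 - M with ho₀def
    have hL₀ : cs.length - (1 + k₀) = M := by omega
    have ho₀lt : o₀ < 1 + k₀ := by omega
    have hpx₀ : pA cs (k₀, o₀) = true := by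
      apply decide_eq_true
      apply (slice_eq_iff_goodE cs k₀ o₀ (by omega) ho₀lt).mpr
      rw [show o₀ + (cs.length - (1 + k₀)) - 1 = e₀ from by omega,
        show cs.length - (1 + k₀) = M from by omega]
      exact hgood₀
    have hsplitA : pairsA cs =
        ((List.range k₀).flatMap (fun k => (List.range (1 + k)).map (fun o => (k, o))) ++
          (List.range o₀).map (fun o => (k₀, o))) ++ (k₀, o₀) ::
        ((List.range' (o₀ + 1) (1 + k₀ - o₀ - 1)).map (fun o => (k₀, o)) ++
          (List.range' (k₀ + 1) (cs.length - 1 - k₀ - 1)).flatMap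
            (fun k => (List.range (1 + k)).map (fun o => (k, o)))) := by
      rw [pairsA, range_split k₀ (cs.length - 1) (by omega)]
      rw [List.flatMap_append, List.flatMap_cons]
      rw [range_split o₀ (1 + k₀) ho₀lt, List.map_append, List.map_cons]
      simp [List.append_assoc]
    have hA : (pairsA cs).foldl (pvStep (pA cs) (fA cs) (gA cs)) (0, none, none) =
        (fA cs (k₀, o₀), gA cs (k₀, o₀)) := by
      rw [hsplitA]
      apply pvStep_split
      · exact hpx₀
      · simp only [fA]
        exact_mod_cast (show 0 < cs.length - (1 + k₀) from by omega)
      · -- everything strictly before (k₀, o₀) fails to match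
        intro x hx hp
        simp only [List.mem_append, List.mem_flatMap, List.mem_map, List.mem_range] at hx
        rcases hx with ⟨k, hk, o, ho, rfl⟩ | ⟨o, ho, rfl⟩
        · -- longer suffixes never match anywhere
          exfalso
          have heq := of_decide_eq_true hp
          have hgood := (slice_eq_iff_goodE cs k o (by omega) ho).mp heq
          have hml := (le_matchLen_iff cs (o + (cs.length - (1 + k)) - 1)
            (cs.length - (1 + k))).mpr ⟨by omega, hgood⟩
          have := le_trans hml (hMle _ (by omega))
          omega
        · -- same length, earlier offset: contradicts minimality of e₀
          exfalso
          have heq := of_decide_eq_true hp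
          have hgood := (slice_eq_iff_goodE cs k₀ o (by omega) (by omega)).mp heq
          have hmm := (le_matchLen_iff cs (o + (cs.length - (1 + k₀)) - 1)
            (cs.length - (1 + k₀))).mpr ⟨by omega, hgood⟩
          rw [hL₀] at hmm
          exact absurd ⟨by omega, hmm⟩ (Nat.find_min hex (by omega))
      · -- everything after never beats the stored maximum
        intro x hx _
        simp only [List.mem_append, List.mem_flatMap, List.mem_map, List.mem_range'_1] at hx
        rcases hx with ⟨o, ho, rfl⟩ | ⟨k, hk, o, ho, rfl⟩
        · exact le_refl _
        · simp only [fA]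
          exact_mod_cast (show cs.length - (1 + k) ≤ cs.length - (1 + k₀) from by omega)
    rw [hA, hB]
    -- both sides now reduce to the same literal triple
    simp only [fA, gA, hL₀]
    rw [if_neg (by omega : ¬ M = 0)]
    rw [show ((o₀ : Int) + ((M : Nat) : Int) - 1) = ((e₀ : Nat) : Int) from by omega,
      show 1 + k₀ = cs.length - M from by omega]
    simp
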